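-- pv_equiv track=rewrite | github.com/jalyper/global-trade-visualizer | trade_data.py | is_same_region
-- ===== SOURCE A (Python) =====
-- def is_same_region(country1, country2):
--     """Check if two countries are in the same region."""
--
--     # Define regions
--     regions = {
--         "North America": ["USA", "CAN", "MEX"],
--         "Europe": ["DEU", "GBR", "FRA", "ITA", "NLD"],
--         "Asia": ["CHN", "JPN", "IND", "KOR", "SGP"],
--         "Other": ["RUS", "BRA"]
--     }
--
--     # Check if countries are in the same region
--     for region, countries in regions.items():
--         if country1 in countries and country2 in countries:
--             return True
--
--     return False
-- ===== SOURCE B (Python) =====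
-- # B keeps a flat country -> region table and answers with two guarded lookups,
-- # no loop over regions at all.
-- _REGION_OF = {
--     "USA": "North America", "CAN": "North America", "MEX": "North America",
--     "DEU": "Europe", "GBR": "Europe", "FRA": "Europe", "ITA": "Europe", "NLD": "Europe",
--     "CHN": "Asia", "JPN": "Asia", "IND": "Asia", "KOR": "Asia", "SGP": "Asia",
--     "RUS": "Other", "BRA": "Other",
-- }
--
-- def is_same_region(country1, country2):
--     """Check if two countries are in the same region."""
--     r1 = _REGION_OF.get(country1)
--     return r1 is not None and r1 == _REGION_OF.get(country2)
-- ===== Notes on version B (the rewrite author's own statement) =====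
-- stated objective: simpler
-- what changed: B replaces A's loop over region lists (two membership scans per region) with a flat country->region constant table and two guarded O(1) lookups; no loop remains.
import Mathlib
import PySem

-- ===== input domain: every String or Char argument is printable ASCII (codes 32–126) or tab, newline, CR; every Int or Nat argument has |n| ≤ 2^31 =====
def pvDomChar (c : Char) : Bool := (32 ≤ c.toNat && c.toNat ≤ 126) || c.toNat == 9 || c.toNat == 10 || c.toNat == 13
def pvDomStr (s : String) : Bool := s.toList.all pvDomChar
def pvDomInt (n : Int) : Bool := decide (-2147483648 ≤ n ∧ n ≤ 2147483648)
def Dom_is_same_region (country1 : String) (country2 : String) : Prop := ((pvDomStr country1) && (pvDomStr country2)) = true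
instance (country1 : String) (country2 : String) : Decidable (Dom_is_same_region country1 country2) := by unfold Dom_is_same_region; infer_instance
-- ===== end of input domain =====

-- B answers with two guarded lookups in a flat country -> region constant table,
-- instead of A's loop over regions with two list-membership scans per region (objective: simpler).

-- ===== PORT A =====
def pvRegionsA : List (String × List String) :=
  [("North America", ["USA", "CAN", "MEX"]),
   ("Europe", ["DEU", "GBR", "FRA", "ITA", "NLD"]),
   ("Asia", ["CHN", "JPN", "IND", "KOR", "SGP"]),
   ("Other", ["RUS", "BRA"])]

-- the for-loop over regions.items() with early 'return True', falling through to 'return False'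
def pvLoopA (country1 country2 : String) : List (String × List String) → Bool
  | [] => false
  | (_, countries) :: rest =>
      if countries.contains country1 && countries.contains country2 then true
      else pvLoopA country1 country2 rest

def is_same_region (country1 : String) (country2 : String) : Bool :=
  pvLoopA country1 country2 pvRegionsA

-- ===== PORT B =====
-- the module-level constant _REGION_OF, a flat country -> region dict literal
def pvRegionOf : PySem.Dict String String := PySem.Dict.mk
  [("USA","North America"),("CAN","North America"),("MEX","North America"),
   ("DEU","Europe"),("GBR","Europe"),("FRA","Europe"),("ITA","Europe"),("NLD","Europe"),
   ("CHN","Asia"),("JPN","Asia"),("IND","Asia"),("KOR","Asia"),("SGP","Asia"),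
   ("RUS","Other"),("BRA","Other")]

-- r1 = _REGION_OF.get(country1); return r1 is not None and r1 == _REGION_OF.get(country2)
def is_same_region_alt (country1 : String) (country2 : String) : Bool :=
  match pvRegionOf.get? country1 with
  | none => false
  | some r1 => pvRegionOf.get? country2 == some r1

-- ===== PRECONDITION & SPEC =====
def Spec_is_same_region (country1 : String) (country2 : String) (out : Bool) : Prop := out = is_same_region_alt country1 country2
instance (country1 : String) (country2 : String) (out : Bool) : Decidable (Spec_is_same_region country1 country2 out) := by unfold Spec_is_same_region; infer_instance

-- ===== CLAIM (what is proved, stated in full; the proofs are below) =====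
def Claim_equal_is_same_region : Prop := ∀ (country1 : String) (country2 : String), Dom_is_same_region country1 country2 → Spec_is_same_region country1 country2 (is_same_region country1 country2)

-- ===== LEMMAS AND PROOFS =====
lemma get_pvRegionOf (c : String) : pvRegionOf.get? c =
    if c = "USA" then some "North America"
    else if c = "CAN" then some "North America"
    else if c = "MEX" then some "North America"
    else if c = "DEU" then some "Europe"
    else if c = "GBR" then some "Europe"
    else if c = "FRA" then some "Europe"
    else if c = "ITA" then some "Europe"
    else if c = "NLD" then some "Europe"
    else if c = "CHN" then some "Asia"
    else if c = "JPN" then some "Asia"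
    else if c = "IND" then some "Asia"
    else if c = "KOR" then some "Asia"
    else if c = "SGP" then some "Asia"
    else if c = "RUS" then some "Other"
    else if c = "BRA" then some "Other"
    else none := by
  by_cases h0 : c = "USA"
  · subst h0; decide
  by_cases h1 : c = "CAN"
  · subst h1; decide
  by_cases h2 : c = "MEX"
  · subst h2; decide
  by_cases h3 : c = "DEU"
  · subst h3; decide
  by_cases h4 : c = "GBR"
  · subst h4; decide
  by_cases h5 : c = "FRA"
  · subst h5; decide
  by_cases h6 : c = "ITA"
  · subst h6; decide
  by_cases h7 : c = "NLD"
  · subst h7; decide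
  by_cases h8 : c = "CHN"
  · subst h8; decide
  by_cases h9 : c = "JPN"
  · subst h9; decide
  by_cases h10 : c = "IND"
  · subst h10; decide
  by_cases h11 : c = "KOR"
  · subst h11; decide
  by_cases h12 : c = "SGP"
  · subst h12; decide
  by_cases h13 : c = "RUS"
  · subst h13; decide
  by_cases h14 : c = "BRA"
  · subst h14; decide
  unfold pvRegionOf
  simp [PySem.Dict.get?, beq_iff_eq, h0, h1, h2, h3, h4, h5, h6, h7, h8, h9, h10, h11, h12, h13, h14]
  exact ⟨Ne.symm h0, Ne.symm h1, Ne.symm h2, Ne.symm h3, Ne.symm h4, Ne.symm h5, Ne.symm h6, Ne.symm h7, Ne.symm h8, Ne.symm h9, Ne.symm h10, Ne.symm h11, Ne.symm h12, Ne.symm h13, Ne.symm h14⟩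

set_option maxHeartbeats 800000 in
lemma loopA_eq (c1 c2 : String) : pvLoopA c1 c2 pvRegionsA =
    ((["USA","CAN","MEX"].contains c1 && ["USA","CAN","MEX"].contains c2) ||
     (["DEU","GBR","FRA","ITA","NLD"].contains c1 && ["DEU","GBR","FRA","ITA","NLD"].contains c2) ||
     (["CHN","JPN","IND","KOR","SGP"].contains c1 && ["CHN","JPN","IND","KOR","SGP"].contains c2) ||
     (["RUS","BRA"].contains c1 && ["RUS","BRA"].contains c2)) := by
  simp [pvLoopA, pvRegionsA, Bool.if_true_left, Bool.or_assoc]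

lemma contains_region (c r : String) (cs : List String)
    (hr : ∀ x, pvRegionOf.get? x = some r ↔ x ∈ cs) :
    cs.contains c = (pvRegionOf.get? c == some r) := by
  by_cases h : c ∈ cs
  · simp [h, (hr c).mpr h]
  · simp only [List.contains_eq_mem, decide_eq_false h]
    rcases hg : pvRegionOf.get? c with _ | r'
    · simp
    · by_cases hrr : r' = r
      · exact absurd ((hr c).mp (hrr ▸ hg)) h
      · simp [hrr]

set_option maxHeartbeats 1600000 in
lemma region_NA (x : String) : pvRegionOf.get? x = some "North America" ↔ x ∈ (["USA","CAN","MEX"] : List String) := by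
  by_cases h0 : x = "USA"
  · subst h0; decide
  by_cases h1 : x = "CAN"
  · subst h1; decide
  by_cases h2 : x = "MEX"
  · subst h2; decide
  by_cases h3 : x = "DEU"
  · subst h3; decide
  by_cases h4 : x = "GBR"
  · subst h4; decide
  by_cases h5 : x = "FRA"
  · subst h5; decide
  by_cases h6 : x = "ITA"
  · subst h6; decide
  by_cases h7 : x = "NLD"
  · subst h7; decide
  by_cases h8 : x = "CHN"
  · subst h8; decide
  by_cases h9 : x = "JPN"
  · subst h9; decide
  by_cases h10 : x = "IND"
  · subst h10; decide
  by_cases h11 : x = "KOR"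
  · subst h11; decide
  by_cases h12 : x = "SGP"
  · subst h12; decide
  by_cases h13 : x = "RUS"
  · subst h13; decide
  by_cases h14 : x = "BRA"
  · subst h14; decide
  rw [get_pvRegionOf]
  simp [h0, h1, h2, h3, h4, h5, h6, h7, h8, h9, h10, h11, h12, h13, h14]

set_option maxHeartbeats 1600000 in
lemma region_EU (x : String) : pvRegionOf.get? x = some "Europe" ↔ x ∈ (["DEU","GBR","FRA","ITA","NLD"] : List String) := by
  by_cases h0 : x = "USA"
  · subst h0; decide
  by_cases h1 : x = "CAN"
  · subst h1; decide
  by_cases h2 : x = "MEX"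
  · subst h2; decide
  by_cases h3 : x = "DEU"
  · subst h3; decide
  by_cases h4 : x = "GBR"
  · subst h4; decide
  by_cases h5 : x = "FRA"
  · subst h5; decide
  by_cases h6 : x = "ITA"
  · subst h6; decide
  by_cases h7 : x = "NLD"
  · subst h7; decide
  by_cases h8 : x = "CHN"
  · subst h8; decide
  by_cases h9 : x = "JPN"
  · subst h9; decide
  by_cases h10 : x = "IND"
  · subst h10; decide
  by_cases h11 : x = "KOR"
  · subst h11; decide
  by_cases h12 : x = "SGP"
  · subst h12; decide
  by_cases h13 : x = "RUS"
  · subst h13; decide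
  by_cases h14 : x = "BRA"
  · subst h14; decide
  rw [get_pvRegionOf]
  simp [h0, h1, h2, h3, h4, h5, h6, h7, h8, h9, h10, h11, h12, h13, h14]

set_option maxHeartbeats 1600000 in
lemma region_AS (x : String) : pvRegionOf.get? x = some "Asia" ↔ x ∈ (["CHN","JPN","IND","KOR","SGP"] : List String) := by
  by_cases h0 : x = "USA"
  · subst h0; decide
  by_cases h1 : x = "CAN"
  · subst h1; decide
  by_cases h2 : x = "MEX"
  · subst h2; decide
  by_cases h3 : x = "DEU"
  · subst h3; decide
  by_cases h4 : x = "GBR"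
  · subst h4; decide
  by_cases h5 : x = "FRA"
  · subst h5; decide
  by_cases h6 : x = "ITA"
  · subst h6; decide
  by_cases h7 : x = "NLD"
  · subst h7; decide
  by_cases h8 : x = "CHN"
  · subst h8; decide
  by_cases h9 : x = "JPN"
  · subst h9; decide
  by_cases h10 : x = "IND"
  · subst h10; decide
  by_cases h11 : x = "KOR"
  · subst h11; decide
  by_cases h12 : x = "SGP"
  · subst h12; decide
  by_cases h13 : x = "RUS"
  · subst h13; decide
  by_cases h14 : x = "BRA"
  · subst h14; decide
  rw [get_pvRegionOf]
  simp [h0, h1, h2, h3, h4, h5, h6, h7, h8, h9, h10, h11, h12, h13, h14]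

set_option maxHeartbeats 1600000 in
lemma region_OT (x : String) : pvRegionOf.get? x = some "Other" ↔ x ∈ (["RUS","BRA"] : List String) := by
  by_cases h0 : x = "USA"
  · subst h0; decide
  by_cases h1 : x = "CAN"
  · subst h1; decide
  by_cases h2 : x = "MEX"
  · subst h2; decide
  by_cases h3 : x = "DEU"
  · subst h3; decide
  by_cases h4 : x = "GBR"
  · subst h4; decide
  by_cases h5 : x = "FRA"
  · subst h5; decide
  by_cases h6 : x = "ITA"
  · subst h6; decide
  by_cases h7 : x = "NLD"
  · subst h7; decide
  by_cases h8 : x = "CHN"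
  · subst h8; decide
  by_cases h9 : x = "JPN"
  · subst h9; decide
  by_cases h10 : x = "IND"
  · subst h10; decide
  by_cases h11 : x = "KOR"
  · subst h11; decide
  by_cases h12 : x = "SGP"
  · subst h12; decide
  by_cases h13 : x = "RUS"
  · subst h13; decide
  by_cases h14 : x = "BRA"
  · subst h14; decide
  rw [get_pvRegionOf]
  simp [h0, h1, h2, h3, h4, h5, h6, h7, h8, h9, h10, h11, h12, h13, h14]

set_option maxHeartbeats 1600000 in
lemma get_mem (c r : String) (h : pvRegionOf.get? c = some r) :
    r = "North America" ∨ r = "Europe" ∨ r = "Asia" ∨ r = "Other" := by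
  by_cases h0 : c = "USA"
  · subst h0
    rw [show pvRegionOf.get? "USA" = some "North America" from by decide] at h
    injection h with h; subst h; simp
  by_cases h1 : c = "CAN"
  · subst h1
    rw [show pvRegionOf.get? "CAN" = some "North America" from by decide] at h
    injection h with h; subst h; simp
  by_cases h2 : c = "MEX"
  · subst h2
    rw [show pvRegionOf.get? "MEX" = some "North America" from by decide] at h
    injection h with h; subst h; simp
  by_cases h3 : c = "DEU"
  · subst h3
    rw [show pvRegionOf.get? "DEU" = some "Europe" from by decide] at h
    injection h with h; subst h; simp
  by_cases h4 : c = "GBR"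
  · subst h4
    rw [show pvRegionOf.get? "GBR" = some "Europe" from by decide] at h
    injection h with h; subst h; simp
  by_cases h5 : c = "FRA"
  · subst h5
    rw [show pvRegionOf.get? "FRA" = some "Europe" from by decide] at h
    injection h with h; subst h; simp
  by_cases h6 : c = "ITA"
  · subst h6
    rw [show pvRegionOf.get? "ITA" = some "Europe" from by decide] at h
    injection h with h; subst h; simp
  by_cases h7 : c = "NLD"
  · subst h7
    rw [show pvRegionOf.get? "NLD" = some "Europe" from by decide] at h
    injection h with h; subst h; simp
  by_cases h8 : c = "CHN"
  · subst h8
    rw [show pvRegionOf.get? "CHN" = some "Asia" from by decide] at h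
    injection h with h; subst h; simp
  by_cases h9 : c = "JPN"
  · subst h9
    rw [show pvRegionOf.get? "JPN" = some "Asia" from by decide] at h
    injection h with h; subst h; simp
  by_cases h10 : c = "IND"
  · subst h10
    rw [show pvRegionOf.get? "IND" = some "Asia" from by decide] at h
    injection h with h; subst h; simp
  by_cases h11 : c = "KOR"
  · subst h11
    rw [show pvRegionOf.get? "KOR" = some "Asia" from by decide] at h
    injection h with h; subst h; simp
  by_cases h12 : c = "SGP"
  · subst h12
    rw [show pvRegionOf.get? "SGP" = some "Asia" from by decide] at h
    injection h with h; subst h; simp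
  by_cases h13 : c = "RUS"
  · subst h13
    rw [show pvRegionOf.get? "RUS" = some "Other" from by decide] at h
    injection h with h; subst h; simp
  by_cases h14 : c = "BRA"
  · subst h14
    rw [show pvRegionOf.get? "BRA" = some "Other" from by decide] at h
    injection h with h; subst h; simp
  rw [get_pvRegionOf] at h
  simp [h0, h1, h2, h3, h4, h5, h6, h7, h8, h9, h10, h11, h12, h13, h14] at h

set_option maxHeartbeats 1600000 in
theorem is_same_region_agrees (c1 c2 : String) : is_same_region c1 c2 = is_same_region_alt c1 c2 := by
  unfold is_same_region is_same_region_alt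
  rw [loopA_eq,
     contains_region c1 _ _ region_NA, contains_region c2 _ _ region_NA,
     contains_region c1 _ _ region_EU, contains_region c2 _ _ region_EU,
     contains_region c1 _ _ region_AS, contains_region c2 _ _ region_AS,
     contains_region c1 _ _ region_OT, contains_region c2 _ _ region_OT]
  generalize pvRegionOf.get? c2 = b
  rcases h1 : pvRegionOf.get? c1 with _ | r1
  · cases b <;>
      simp only [Option.none_beq_some, Option.some_beq_some, Bool.false_and, Bool.and_self,
        Bool.or_self]
  · rcases get_mem c1 r1 h1 with h | h | h | h <;> subst h <;> cases b <;>
      simp only [Option.some_beq_some, Option.none_beq_some, String.reduceBEq, BEq.rfl,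
        Bool.false_and, Bool.true_and, Bool.and_false, Bool.and_self, Bool.or_self,
        Bool.false_or, Bool.or_false]

-- ===== VERDICT (by name: the statement is the Claim_ definition above) =====
theorem is_same_region_spec : Claim_equal_is_same_region := by
  intro c1 c2 _
  show is_same_region c1 c2 = is_same_region_alt c1 c2
  exact is_same_region_agrees c1 c2
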